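-- pv_equiv track=rewrite | github.com/um-computacion-tm/sistemas-de-numeracion-sofiasoler16 | cambiarbase.py | binariohexa
-- ===== SOURCE A (Python) =====
-- def binariohexa(numero):
--     diccnum = {"0000": 0, "0001":1, "0010":2, "0011": 3, "0100": 4, "0101": 5, "0110": 6, "0111":7, "1000":8, "1001":9, "1010":"A", "1011":"B",
--                "1100":"C", "1101":"D", "1110":"E", "1111":"F"}
--
--     d = numero.split(" ")
--
--     fin = []
--     for c in d:
--         for x, v in diccnum.items():
--             if c == x:
--                 fin.append(str(v))
--
--
--     result = "".join(fin)
--     return result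
-- ===== SOURCE B (Python) =====
-- def binariohexa(numero):
--     out = []
--     for c in numero.split(" "):
--         if len(c) == 4 and all(ch in "01" for ch in c):
--             v = int(c, 2)
--             out.append(str(v) if v < 10 else "ABCDEF"[v - 10])
--     return "".join(out)
-- ===== Notes on version B (the rewrite author's own statement) =====
-- stated objective: idiomatic
-- what changed: Replaces the 16-entry lookup dict and its inner linear scan per group by a direct validity check (length 4, all chars binary) plus base-2 parsing of the nibble, computing the hex digit arithmetically.
import Mathlib
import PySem

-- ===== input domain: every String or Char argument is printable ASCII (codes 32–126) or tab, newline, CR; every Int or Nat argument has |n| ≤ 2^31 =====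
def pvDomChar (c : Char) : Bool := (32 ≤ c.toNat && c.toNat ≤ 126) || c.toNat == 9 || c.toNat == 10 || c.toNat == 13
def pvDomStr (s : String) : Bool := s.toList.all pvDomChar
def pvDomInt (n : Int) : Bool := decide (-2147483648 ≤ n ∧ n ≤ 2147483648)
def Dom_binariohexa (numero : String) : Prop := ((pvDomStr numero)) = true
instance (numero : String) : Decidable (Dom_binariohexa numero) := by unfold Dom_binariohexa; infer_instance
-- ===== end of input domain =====

-- B replaces the dict and its per-group linear scan by a direct validity check plus base-2 parsing (idiomatic, not measured faster).

-- ===== PORT A =====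
-- the literal dict: mixed int/str values modelled as a sum, str(v) as strOfA
def diccnumA : List (String × (Int ⊕ String)) :=
  [("0000", .inl 0), ("0001", .inl 1), ("0010", .inl 2), ("0011", .inl 3),
   ("0100", .inl 4), ("0101", .inl 5), ("0110", .inl 6), ("0111", .inl 7),
   ("1000", .inl 8), ("1001", .inl 9), ("1010", .inr "A"), ("1011", .inr "B"),
   ("1100", .inr "C"), ("1101", .inr "D"), ("1110", .inr "E"), ("1111", .inr "F")]

def strOfA : Int ⊕ String → String
  | .inl n => PySem.Int.toStr n
  | .inr s => s

def binariohexa (numero : String) : String :=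
  let d := (PySem.Str.split? numero " ").getD []
  let fin := d.foldl (fun acc c =>
    diccnumA.foldl (fun acc2 p => if c == p.1 then acc2 ++ [strOfA p.2] else acc2) acc) []
  PySem.Str.join "" fin

-- ===== PORT B =====
-- len(c) == 4 and all(ch in "01" for ch in c)
def validNibble (c : String) : Bool :=
  PySem.Str.len c == 4 && c.toList.all (fun ch => ch == '0' || ch == '1')

-- int(c, 2): exact on strings whose chars are all '0'/'1' (the only place B calls it)
def parseBin (c : String) : Int :=
  c.toList.foldl (fun a ch => 2 * a + (if ch == '1' then 1 else 0)) 0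

-- str(v) if v < 10 else "ABCDEF"[v-10]
def hexDigit (v : Int) : String :=
  if v < 10 then PySem.Int.toStr v
  else ((PySem.Str.pyGet? "ABCDEF" (v - 10)).map fun ch => String.ofList [ch]).getD ""

def binariohexa_alt (numero : String) : String :=
  let out := ((PySem.Str.split? numero " ").getD []).foldl (fun acc c =>
    if validNibble c then acc ++ [hexDigit (parseBin c)] else acc) []
  PySem.Str.join "" out

-- ===== PRECONDITION & SPEC =====
def Spec_binariohexa (numero : String) (out : String) : Prop := out = binariohexa_alt numero
instance (numero : String) (out : String) : Decidable (Spec_binariohexa numero out) := by unfold Spec_binariohexa; infer_instance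

-- ===== CLAIM (what is proved, stated in full; the proofs are below) =====
def Claim_equal_binariohexa : Prop := ∀ (numero : String), Dom_binariohexa numero → Spec_binariohexa numero (binariohexa numero)

-- ===== LEMMAS AND PROOFS =====

-- the list contributed by one group c (B's step with acc = [])
def contrib (c : String) : List String :=
  if validNibble c then [hexDigit (parseBin c)] else []

theorem keys_valid : ∀ p ∈ diccnumA, validNibble p.1 = true := by decide

-- A's inner scan over the dict appends nothing when c is not a valid nibble
theorem innerA_invalid (c : String) (hv : validNibble c = false) :
    ∀ (L : List (String × (Int ⊕ String))), (∀ p ∈ L, validNibble p.1 = true) →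
      ∀ acc : List String,
        L.foldl (fun acc2 p => if c == p.1 then acc2 ++ [strOfA p.2] else acc2) acc = acc := by
  intro L
  induction L with
  | nil => intro _ acc; rfl
  | cons p t ih =>
    intro hL acc
    have hkey : validNibble p.1 = true := hL p (List.mem_cons_self ..)
    have hne : (c == p.1) = false := by
      apply beq_eq_false_iff_ne.mpr
      intro h; rw [h, hkey] at hv; cases hv
    simp only [List.foldl_cons, hne, Bool.false_eq_true, if_false]
    exact ih (fun q hq => hL q (List.mem_cons_of_mem _ hq)) acc

-- a valid nibble has exactly four binary chars
theorem valid_shape (c : String) (hv : validNibble c = true) :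
    ∃ a b d e : Char, c = String.ofList [a, b, d, e] ∧
      (a = '0' ∨ a = '1') ∧ (b = '0' ∨ b = '1') ∧ (d = '0' ∨ d = '1') ∧ (e = '0' ∨ e = '1') := by
  unfold validNibble at hv
  rw [Bool.and_eq_true] at hv
  obtain ⟨hlen, hall⟩ := hv
  have hlen4 : c.toList.length = 4 := by
    have := (beq_iff_eq).mp hlen
    rw [PySem.Str.len_eq] at this
    exact_mod_cast this
  have hb : ∀ ch ∈ c.toList, ch = '0' ∨ ch = '1' := by
    intro ch hch
    have := List.all_eq_true.mp hall ch hch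
    rcases Bool.or_eq_true .. |>.mp this with h | h
    · exact Or.inl (beq_iff_eq.mp h)
    · exact Or.inr (beq_iff_eq.mp h)
  match hl : c.toList, hlen4 with
  | [a, b, d, e], _ =>
    refine ⟨a, b, d, e, ?_, ?_, ?_, ?_, ?_⟩
    · rw [← hl]; exact String.ofList_toList.symm
    · exact hb a (by rw [hl]; simp)
    · exact hb b (by rw [hl]; simp)
    · exact hb d (by rw [hl]; simp)
    · exact hb e (by rw [hl]; simp)

-- per-group agreement: A's inner scan (from acc = []) equals B's contribution
theorem innerA_eq_contrib (c : String) :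
    diccnumA.foldl (fun acc2 p => if c == p.1 then acc2 ++ [strOfA p.2] else acc2) [] = contrib c := by
  by_cases hv : validNibble c = true
  · obtain ⟨a, b, d, e, rfl, ha, hb, hd, he⟩ := valid_shape c hv
    rcases ha with rfl | rfl <;> rcases hb with rfl | rfl <;>
      rcases hd with rfl | rfl <;> rcases he with rfl | rfl <;> decide
  · have hv' : validNibble c = false := by simpa using hv
    rw [innerA_invalid c hv' diccnumA keys_valid []]
    simp [contrib, hv']

-- the inner scan factors out its accumulator
theorem foldl_if_append (c : String) (L : List (String × (Int ⊕ String))) (acc : List String) :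
    L.foldl (fun acc2 p => if c == p.1 then acc2 ++ [strOfA p.2] else acc2) acc
      = acc ++ L.foldl (fun acc2 p => if c == p.1 then acc2 ++ [strOfA p.2] else acc2) [] := by
  induction L generalizing acc with
  | nil => simp
  | cons p t ih =>
    simp only [List.foldl_cons]
    by_cases h : (c == p.1) = true
    · rw [h, if_pos rfl, if_pos rfl, ih (acc ++ [strOfA p.2]), ih ([] ++ [strOfA p.2]),
        List.nil_append, List.append_assoc]
    · have h' : (c == p.1) = false := by simpa using h
      rw [h']
      simp only [Bool.false_eq_true, if_false]
      exact ih acc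

-- A's inner scan from an arbitrary accumulator
theorem innerA_acc (c : String) (acc : List String) :
    diccnumA.foldl (fun acc2 p => if c == p.1 then acc2 ++ [strOfA p.2] else acc2) acc
      = acc ++ contrib c := by
  rw [foldl_if_append, innerA_eq_contrib c]

-- both outer loops compute acc ++ flatten of the per-group contributions
theorem outer_eq (d : List String) (acc : List String) :
    d.foldl (fun acc c =>
        diccnumA.foldl (fun acc2 p => if c == p.1 then acc2 ++ [strOfA p.2] else acc2) acc) acc
      = d.foldl (fun acc c => if validNibble c then acc ++ [hexDigit (parseBin c)] else acc) acc := by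
  induction d generalizing acc with
  | nil => rfl
  | cons c t ih =>
    rw [List.foldl_cons, List.foldl_cons, innerA_acc, ih]
    congr 1
    by_cases hv : validNibble c = true
    · simp [contrib, hv]
    · have hv' : validNibble c = false := by simpa using hv
      simp [contrib, hv']

-- ===== VERDICT (by name: the statement is the Claim_ definition above) =====
theorem binariohexa_spec : Claim_equal_binariohexa := by
  intro numero _
  unfold Spec_binariohexa binariohexa binariohexa_alt
  simp only [outer_eq]
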